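-- pv_equiv track=rewrite | github.com/xsj57/DIW | Variable_height.py | get_last_z_indices
-- ===== SOURCE A (Python) =====
-- def get_last_z_indices(lines):
--     """
--     Finds the line index and part index of the very last Z command in the file.
--     """
--     last_z_line_global_idx = -1
--     last_z_part_idx_in_line = -1
--
--     for i in range(len(lines) - 1, -1, -1):
--         line_content_scan = lines[i]
--         stripped_line_scan = line_content_scan.strip()
--         if not stripped_line_scan or stripped_line_scan.startswith(";") or stripped_line_scan.startswith("("):
--             continue
--
--         parts_scan = stripped_line_scan.split()
--         found_z_in_this_line_scan = False
--         for j in range(len(parts_scan) - 1, -1, -1):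
--             if parts_scan[j].startswith("Z"):
--                 try:
--                     float(parts_scan[j][1:])
--                     last_z_line_global_idx = i
--                     last_z_part_idx_in_line = j
--                     found_z_in_this_line_scan = True
--                     break
--                 except ValueError:
--                     continue
--         if found_z_in_this_line_scan:
--             break
--     return last_z_line_global_idx, last_z_part_idx_in_line
-- ===== SOURCE B (Python) =====
-- def _valid_z(part):
--     if not part.startswith("Z"):
--         return False
--     try:
--         float(part[1:])
--         return True
--     except ValueError:
--         return False
--
--
-- def get_last_z_indices(lines):
--     """
--     Finds the line index and part index of the very last Z command in the file.
--     """
--     hits = []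
--     for i, line in enumerate(lines):
--         stripped = line.strip()
--         if not stripped or stripped[0] in ";(":
--             continue
--         hits.extend((i, j) for j, part in enumerate(stripped.split()) if _valid_z(part))
--     return hits[-1] if hits else (-1, -1)
-- ===== Notes on version B (the rewrite author's own statement) =====
-- stated objective: alternative
-- what changed: Replaces A's backward double-early-exit scan by a forward pass that collects every (line, part) position of a valid Z command into a list and returns its last element.
import Mathlib
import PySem

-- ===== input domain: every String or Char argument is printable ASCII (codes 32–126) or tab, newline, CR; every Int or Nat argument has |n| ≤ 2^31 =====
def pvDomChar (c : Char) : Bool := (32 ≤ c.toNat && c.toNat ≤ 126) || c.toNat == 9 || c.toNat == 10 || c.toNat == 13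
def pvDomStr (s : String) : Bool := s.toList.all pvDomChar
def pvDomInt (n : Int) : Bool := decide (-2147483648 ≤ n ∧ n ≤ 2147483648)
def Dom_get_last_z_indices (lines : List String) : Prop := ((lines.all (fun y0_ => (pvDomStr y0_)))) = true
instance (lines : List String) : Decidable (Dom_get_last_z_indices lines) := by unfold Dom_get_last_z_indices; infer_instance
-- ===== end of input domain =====

-- B replaces A's backward double-early-exit scan by a forward pass collecting all Z hits and returning the last; same value, no side effects.

-- ===== PORT A =====
-- A ports Python's float(s) acceptance as a recursive-descent consumption of CPython's
-- grammar (exact on ASCII input): digitpart = digit (('_')? digit)*.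
def pvDigitsGo : List Char → List Char
  | '_' :: c :: r => if c.isDigit then pvDigitsGo r else '_' :: c :: r
  | c :: r => if c.isDigit then pvDigitsGo r else c :: r
  | [] => []

def pvDigitpart? : List Char → Option (List Char)
  | c :: r => if c.isDigit then some (pvDigitsGo r) else none
  | [] => none

def pvFloatExp : List Char → Bool
  | [] => true
  | c :: r =>
    if c = 'e' || c = 'E' then
      let r' := match r with
        | '+' :: r' => r'
        | '-' :: r' => r'
        | _ => r
      match pvDigitpart? r' with
      | some rest => rest = []
      | none => false
    else false

-- True iff Python's float(s) succeeds (exact on ASCII: strip, sign, inf/infinity/nan, digitparts with underscores, '.', exponent).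
def pvIsFloat (cs : List Char) : Bool :=
  let s := PySem.Chars.strip cs
  let s := match s with
    | '+' :: r => r
    | '-' :: r => r
    | _ => s
  let ls := PySem.Chars.lower s
  if ls = ['i','n','f'] || ls = ['i','n','f','i','n','i','t','y'] || ls = ['n','a','n'] then true
  else
    match pvDigitpart? s with
    | some r =>
      (match r with
       | '.' :: r2 =>
         (match pvDigitpart? r2 with
          | some r3 => pvFloatExp r3
          | none => pvFloatExp r2)
       | _ => pvFloatExp r)
    | none =>
      (match s with
       | '.' :: r2 =>
         (match pvDigitpart? r2 with
          | some r3 => pvFloatExp r3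
          | none => false)
       | _ => false)

-- parts_scan[j].startswith("Z") and float(parts_scan[j][1:]) succeeds (ValueError → continue)
def pvA_validZ (p : List Char) : Bool :=
  PySem.Chars.startswith p ['Z'] && pvIsFloat (p.drop 1)

-- inner backward loop 'for j in range(len(parts)-1, -1, -1)', break on first valid Z (fuel = j+1)
def pvA_inner (parts : List (List Char)) : Nat → Option Nat
  | 0 => none
  | j + 1 => if pvA_validZ (parts.getD j []) then some j else pvA_inner parts j

-- outer backward loop 'for i in range(len(lines)-1, -1, -1)', break once a line yields a Z
def pvA_outer (lines : List String) : Nat → Int × Int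
  | 0 => (-1, -1)
  | i + 1 =>
    let s := PySem.Chars.strip (lines.getD i "").toList
    if s = [] || PySem.Chars.startswith s [';'] || PySem.Chars.startswith s ['('] then
      pvA_outer lines i
    else
      let parts := PySem.Chars.split₀ s
      match pvA_inner parts parts.length with
      | some j => ((i : Int), (j : Int))
      | none => pvA_outer lines i

def get_last_z_indices (lines : List String) : Int × Int :=
  pvA_outer lines lines.length

-- ===== PORT B =====
-- B ports Python's float(s) acceptance as a deterministic finite automaton run left to
-- right over the (stripped, unsigned) characters — exact on ASCII input.
inductive PvFSt
  | start | intd | intu | pdot | dot0 | frac | fracu | e0 | esgn | edig | eu | bad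
deriving DecidableEq, Repr

def pvFStep : PvFSt → Char → PvFSt
  | .start, c => if c.isDigit then .intd else if c = '.' then .dot0 else .bad
  | .intd, c => if c.isDigit then .intd else if c = '_' then .intu else
                if c = '.' then .pdot else if c = 'e' || c = 'E' then .e0 else .bad
  | .intu, c => if c.isDigit then .intd else .bad
  | .pdot, c => if c.isDigit then .frac else if c = 'e' || c = 'E' then .e0 else .bad
  | .dot0, c => if c.isDigit then .frac else .bad
  | .frac, c => if c.isDigit then .frac else if c = '_' then .fracu else
                if c = 'e' || c = 'E' then .e0 else .bad
  | .fracu, c => if c.isDigit then .frac else .bad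
  | .e0, c => if c.isDigit then .edig else if c = '+' || c = '-' then .esgn else .bad
  | .esgn, c => if c.isDigit then .edig else .bad
  | .edig, c => if c.isDigit then .edig else if c = '_' then .eu else .bad
  | .eu, c => if c.isDigit then .edig else .bad
  | .bad, _ => .bad

def pvFAccept : PvFSt → Bool
  | .intd | .pdot | .frac | .edig => true
  | _ => false

def pvB_isFloat (cs : List Char) : Bool :=
  let s := PySem.Chars.strip cs
  let s := match s with
    | '+' :: r => r
    | '-' :: r => r
    | _ => s
  let ls := PySem.Chars.lower s
  if ls = ['i','n','f'] || ls = ['i','n','f','i','n','i','t','y'] || ls = ['n','a','n'] then true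
  else pvFAccept (s.foldl pvFStep .start)

-- _valid_z
def pvB_validZ (p : List Char) : Bool :=
  match p with
  | 'Z' :: rest => pvB_isFloat rest
  | _ => false

-- the 'hits' list: all (i, j) of valid Z commands, in forward order
def pvB_hits (lines : List String) : List (Int × Int) :=
  (PySem.List.enumerate lines 0).flatMap (fun il =>
    let s := PySem.Chars.strip il.2.toList
    match s with
    | [] => []
    | c :: _ =>
      if c = ';' || c = '(' then []
      else
        (PySem.List.enumerate (PySem.Chars.split₀ s) 0).filterMap
          (fun jp => if pvB_validZ jp.2 then some (il.1, jp.1) else none))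

def get_last_z_indices_alt (lines : List String) : Int × Int :=
  (pvB_hits lines).getLastD (-1, -1)

-- ===== PRECONDITION & SPEC =====
def Spec_get_last_z_indices (lines : List String) (out : Int × Int) : Prop := out = get_last_z_indices_alt lines
instance (lines : List String) (out : Int × Int) : Decidable (Spec_get_last_z_indices lines out) := by unfold Spec_get_last_z_indices; infer_instance

-- ===== CLAIM (what is proved, stated in full; the proofs are below) =====
def Claim_equal_get_last_z_indices : Prop := ∀ (lines : List String), Dom_get_last_z_indices lines → Spec_get_last_z_indices lines (get_last_z_indices lines)

-- ===== LEMMAS AND PROOFS =====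

theorem pv_run_bad (cs : List Char) : cs.foldl pvFStep .bad = .bad := by
  induction cs with
  | nil => rfl
  | cons c r ih => simpa [pvFStep] using ih

theorem pv_acc_edig (cs : List Char) :
    pvFAccept (cs.foldl pvFStep .edig) = decide (pvDigitsGo cs = []) := by
  induction cs using pvDigitsGo.induct with
  | case1 c r hd ih =>
    simp only [List.foldl_cons, pvFStep, hd, if_true,
      if_neg (by decide : ¬('_' : Char).isDigit = true), pvDigitsGo]
    exact ih
  | case2 c r hd =>
    simp [pvFStep, pvDigitsGo, hd, pv_run_bad, pvFAccept]
  | case3 c r h1 hd ih =>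
    simp only [List.foldl_cons, pvFStep, hd, if_true]
    simp [pvDigitsGo, hd, ih]
  | case4 c r h1 hd =>
    by_cases hu : c = '_'
    · subst hu
      cases r with
      | nil => simp [pvFStep, pvDigitsGo, pvFAccept]
      | cons a b => exact (h1 a b rfl rfl).elim
    · simp [pvFStep, pvDigitsGo, hd, hu, pv_run_bad, pvFAccept]
  | case5 => simp [pvDigitsGo, pvFAccept]

theorem pv_acc_esgn (r : List Char) :
    pvFAccept (r.foldl pvFStep .esgn) =
      (match pvDigitpart? r with
       | some rest => decide (rest = [])
       | none => false) := by
  cases r with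
  | nil => rfl
  | cons c r =>
    by_cases hd : c.isDigit
    · simp [pvFStep, hd, pvDigitpart?, pv_acc_edig]
    · simp [pvFStep, hd, pvDigitpart?, pv_run_bad, pvFAccept]

theorem pv_acc_e0 (r : List Char) (c : Char) (hc : c = 'e' ∨ c = 'E') :
    pvFAccept (r.foldl pvFStep .e0) = pvFloatExp (c :: r) := by
  have he : (c = 'e' || c = 'E') = true := by rcases hc with hc | hc <;> simp [hc]
  cases r with
  | nil => simp [pvFStep, pvFloatExp, he, pvDigitpart?, pvFAccept]
  | cons a r =>
    by_cases hd : a.isDigit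
    · have h1 : a ≠ '+' := by rintro rfl; simp at hd
      have h2 : a ≠ '-' := by rintro rfl; simp at hd
      simp [pvFStep, hd, pvFloatExp, he, h1, h2, pvDigitpart?, pv_acc_edig]
    · by_cases hs : a = '+' ∨ a = '-'
      · rcases hs with hs | hs <;> subst hs <;>
          simp [pvFStep, pvFloatExp, he, pv_acc_esgn]
      · push Not at hs
        simp [pvFStep, hd, hs.1, hs.2, pvFloatExp, he, pvDigitpart?, pv_run_bad, pvFAccept]

theorem pv_acc_frac (cs : List Char) :
    pvFAccept (cs.foldl pvFStep .frac) = pvFloatExp (pvDigitsGo cs) := by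
  induction cs using pvDigitsGo.induct with
  | case1 c r hd ih =>
    simp only [List.foldl_cons, pvFStep, hd, if_true,
      if_neg (by decide : ¬('_' : Char).isDigit = true), pvDigitsGo]
    exact ih
  | case2 c r hd =>
    simp [pvFStep, pvDigitsGo, hd, pv_run_bad, pvFAccept, pvFloatExp]
  | case3 c r h1 hd ih =>
    simp only [List.foldl_cons, pvFStep, hd, if_true]
    simp [pvDigitsGo, hd, ih]
  | case4 c r h1 hd =>
    by_cases hu : c = '_'
    · subst hu
      cases r with
      | nil => simp [pvFStep, pvDigitsGo, pvFAccept, pvFloatExp]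
      | cons a b => exact (h1 a b rfl rfl).elim
    · by_cases he : c = 'e' ∨ c = 'E'
      · have hgo : pvDigitsGo (c :: r) = c :: r := by
          rcases he with rfl | rfl <;> simp [pvDigitsGo]
        have hstep : pvFStep .frac c = .e0 := by
          rcases he with rfl | rfl <;> simp [pvFStep]
        rw [hgo, List.foldl_cons, hstep, pv_acc_e0 r c he]
      · push Not at he
        simp [pvFStep, pvDigitsGo, hd, hu, he.1, he.2, pv_run_bad, pvFAccept, pvFloatExp]
  | case5 => simp [pvDigitsGo, pvFAccept, pvFloatExp]

theorem pv_acc_pdot (cs : List Char) :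
    pvFAccept (cs.foldl pvFStep .pdot) =
      (match pvDigitpart? cs with
       | some r3 => pvFloatExp r3
       | none => pvFloatExp cs) := by
  cases cs with
  | nil => rfl
  | cons c r =>
    by_cases hd : c.isDigit
    · simp [pvFStep, hd, pvDigitpart?, pv_acc_frac]
    · by_cases he : c = 'e' ∨ c = 'E'
      · have hstep : pvFStep .pdot c = .e0 := by
          rcases he with rfl | rfl <;> simp [pvFStep]
        have hdp : pvDigitpart? (c :: r) = none := by simp [pvDigitpart?, hd]
        rw [List.foldl_cons, hstep, pv_acc_e0 r c he, hdp]
      · push Not at he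
        simp [pvFStep, hd, he.1, he.2, pvDigitpart?, pv_run_bad, pvFAccept, pvFloatExp]

theorem pv_acc_dot0 (cs : List Char) :
    pvFAccept (cs.foldl pvFStep .dot0) =
      (match pvDigitpart? cs with
       | some r3 => pvFloatExp r3
       | none => false) := by
  cases cs with
  | nil => rfl
  | cons c r =>
    by_cases hd : c.isDigit
    · simp [pvFStep, hd, pvDigitpart?, pv_acc_frac]
    · simp [pvFStep, hd, pvDigitpart?, pv_run_bad, pvFAccept]

theorem pv_acc_intd (cs : List Char) :
    pvFAccept (cs.foldl pvFStep .intd) =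
      (match pvDigitsGo cs with
       | '.' :: r2 =>
         (match pvDigitpart? r2 with
          | some r3 => pvFloatExp r3
          | none => pvFloatExp r2)
       | r => pvFloatExp r) := by
  induction cs using pvDigitsGo.induct with
  | case1 c r hd ih =>
    simp only [List.foldl_cons, pvFStep, hd, if_true,
      if_neg (by decide : ¬('_' : Char).isDigit = true), pvDigitsGo]
    exact ih
  | case2 c r hd =>
    simp [pvFStep, pvDigitsGo, hd, pv_run_bad, pvFAccept, pvFloatExp]
  | case3 c r h1 hd ih =>
    simp only [List.foldl_cons, pvFStep, hd, if_true]
    simp only [pvDigitsGo, hd, if_true]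
    exact ih
  | case4 c r h1 hd =>
    by_cases hu : c = '_'
    · subst hu
      cases r with
      | nil => simp [pvFStep, pvDigitsGo, pvFAccept, pvFloatExp]
      | cons a b => exact (h1 a b rfl rfl).elim
    · by_cases hdot : c = '.'
      · subst hdot
        have hgo : pvDigitsGo ('.' :: r) = '.' :: r := by simp [pvDigitsGo]
        have hstep : pvFStep .intd '.' = .pdot := by simp [pvFStep]
        rw [hgo, List.foldl_cons, hstep]
        exact pv_acc_pdot r
      · by_cases he : c = 'e' ∨ c = 'E'
        · have hgo : pvDigitsGo (c :: r) = c :: r := by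
            rcases he with rfl | rfl <;> simp [pvDigitsGo]
          have hstep : pvFStep .intd c = .e0 := by
            rcases he with rfl | rfl <;> simp [pvFStep]
          rw [hgo, List.foldl_cons, hstep, pv_acc_e0 r c he]
          rcases he with rfl | rfl <;> rfl
        · push Not at he
          have hgo : pvDigitsGo (c :: r) = c :: r := by
            cases r with
            | nil => simp [pvDigitsGo, hd, hu]
            | cons a b => simp [pvDigitsGo, hd, hu]
          rw [hgo]
          simp [pvFStep, hd, hu, hdot, he.1, he.2, pv_run_bad, pvFAccept, pvFloatExp]
  | case5 => simp [pvDigitsGo, pvFAccept, pvFloatExp]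

theorem pv_match_catch (a : Char) (b : List Char) (ha : a ≠ '.')
    (f g : List Char → Bool) :
    (match a :: b with
     | '.' :: r2 => f r2
     | r => g r) = g (a :: b) := by
  split <;> simp_all

theorem pv_acc_start (s : List Char) :
    pvFAccept (s.foldl pvFStep .start) =
      (match pvDigitpart? s with
       | some r =>
         (match r with
          | '.' :: r2 =>
            (match pvDigitpart? r2 with
             | some r3 => pvFloatExp r3
             | none => pvFloatExp r2)
          | _ => pvFloatExp r)
       | none =>
         (match s with
          | '.' :: r2 =>
            (match pvDigitpart? r2 with
             | some r3 => pvFloatExp r3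
             | none => false)
          | _ => false)) := by
  cases s with
  | nil => rfl
  | cons c r =>
    by_cases hd : c.isDigit
    · have hdp : pvDigitpart? (c :: r) = some (pvDigitsGo r) := by simp [pvDigitpart?, hd]
      have hstep : pvFStep .start c = .intd := by simp [pvFStep, hd]
      rw [List.foldl_cons, hstep, pv_acc_intd r]
      simp only [hdp]
      cases hX : pvDigitsGo r with
      | nil => rfl
      | cons a b =>
        by_cases ha : a = '.'
        · subst ha; rfl
        · rw [pv_match_catch a b ha, pv_match_catch a b ha]
    · by_cases hdot : c = '.'
      · subst hdot
        simp [pvFStep, pvDigitpart?, pv_acc_dot0]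
      · simp [pvFStep, hd, hdot, pvDigitpart?, pv_run_bad, pvFAccept]

theorem pv_isFloat_eq (cs : List Char) : pvB_isFloat cs = pvIsFloat cs := by
  simp only [pvB_isFloat, pvIsFloat]
  rw [pv_acc_start]

theorem pv_validZ_eq (p : List Char) : pvB_validZ p = pvA_validZ p := by
  cases p with
  | nil => simp [pvB_validZ, pvA_validZ, PySem.Chars.startswith, List.isPrefixOf]
  | cons c rest =>
    by_cases hc : c = 'Z'
    · subst hc
      simp [pvB_validZ, pvA_validZ, PySem.Chars.startswith, List.isPrefixOf, pv_isFloat_eq]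
    · simp [pvB_validZ, pvA_validZ, PySem.Chars.startswith, List.isPrefixOf, BEq.comm, hc]

theorem pvA_inner_append (ps : List (List Char)) (p : List Char) :
    ∀ k, k ≤ ps.length → pvA_inner (ps ++ [p]) k = pvA_inner ps k := by
  intro k
  induction k with
  | zero => intro _; rfl
  | succ j ih =>
    intro h
    simp only [pvA_inner, List.getD_append ps [p] [] j (by omega), ih (by omega)]

-- last of the per-line hit list = A's backward-with-break inner loop
theorem pv_inner_eq (parts : List (List Char)) (i : Int) :
    ((PySem.List.enumerate parts 0).filterMap
      (fun jp => if pvB_validZ jp.2 then some (i, jp.1) else none)).getLast? =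
    (pvA_inner parts parts.length).map (fun j => (i, (j : Int))) := by
  induction parts using List.reverseRecOn with
  | nil => rfl
  | append_singleton ps p ih =>
    rw [PySem.List.enumerate_append, List.filterMap_append, List.getLast?_append]
    simp only [PySem.List.enumerate_cons, PySem.List.enumerate_nil, List.filterMap_cons,
      List.filterMap_nil, zero_add, List.length_append, List.length_cons, List.length_nil]
    rw [pv_validZ_eq]
    have hget : (ps ++ [p]).getD ps.length [] = p := by
      simp [List.getD_eq_getElem?_getD]
    simp only [pvA_inner, hget, pvA_inner_append ps p ps.length le_rfl]
    cases hv : pvA_validZ p with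
    | true => simp
    | false => simp [ih]

theorem pv_outer_eq (lines : List String) (n : Nat) (h : n ≤ lines.length) :
    (pvB_hits (lines.take n)).getLastD (-1, -1) = pvA_outer lines n := by
  induction n with
  | zero => rfl
  | succ n ih =>
    have hn : n < lines.length := by omega
    rw [List.take_succ_eq_append_getElem hn]
    unfold pvB_hits
    rw [PySem.List.enumerate_append, List.flatMap_append]
    have hlen : (lines.take n).length = n := by simp [List.length_take]; omega
    rw [hlen]
    simp only [PySem.List.enumerate_cons, PySem.List.enumerate_nil, List.flatMap_cons,
      List.flatMap_nil, List.append_nil, zero_add]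
    rw [List.getLastD_eq_getLast?, List.getLast?_append]
    have hrec : (pvB_hits (lines.take n)).getLast?.getD (-1, -1) = pvA_outer lines n := by
      rw [← List.getLastD_eq_getLast?]; exact ih (by omega)
    have hget : lines.getD n "" = lines[n] := List.getD_eq_getElem lines "" hn
    rw [show pvA_outer lines (n + 1) =
      (let s := PySem.Chars.strip (lines.getD n "").toList
       if s = [] || PySem.Chars.startswith s [';'] || PySem.Chars.startswith s ['('] then
         pvA_outer lines n
       else
         let parts := PySem.Chars.split₀ s
         match pvA_inner parts parts.length with
         | some j => ((n : Int), (j : Int))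
         | none => pvA_outer lines n) from rfl]
    rw [hget]
    unfold pvB_hits at hrec
    cases hs : PySem.Chars.strip lines[n].toList with
    | nil => simpa using hrec
    | cons c cs =>
      by_cases hc : c = ';' ∨ c = '('
      · rcases hc with rfl | rfl <;>
          simpa [PySem.Chars.startswith, List.isPrefixOf] using hrec
      · push Not at hc
        have hsw1 : PySem.Chars.startswith (c :: cs) [';'] = false := by
          simp [PySem.Chars.startswith, List.isPrefixOf, BEq.comm, hc.1]
        have hsw2 : PySem.Chars.startswith (c :: cs) ['('] = false := by
          simp [PySem.Chars.startswith, List.isPrefixOf, BEq.comm, hc.2]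
        simp only [hsw1, hsw2, Bool.or_false, List.cons_ne_nil, decide_false,
          decide_eq_true_eq, hc.1, hc.2, if_false, Bool.false_eq_true]
        rw [pv_inner_eq]
        cases hinner : pvA_inner (PySem.Chars.split₀ (c :: cs)) (PySem.Chars.split₀ (c :: cs)).length with
        | some j => simp
        | none => simpa [hinner] using hrec

-- ===== VERDICT (by name: the statement is the Claim_ definition above) =====
theorem get_last_z_indices_spec : Claim_equal_get_last_z_indices := by
  intro lines _
  unfold Spec_get_last_z_indices get_last_z_indices get_last_z_indices_alt
  rw [← pv_outer_eq lines lines.length le_rfl, List.take_length]
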